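-- pv_equiv track=rewrite | github.com/YlanAllouche/dv-tui | dv_tui/data_loaders.py | fill_missing_keys
-- ===== SOURCE A (Python) =====
-- from typing import List, Dict, Any, Union, Optional
--
-- def union_keys(data: List[Dict[str, Any]]) -> List[str]:
--     """Get union of all keys from all dictionaries in data."""
--     keys = set()
--     for item in data:
--         keys.update(item.keys())
--     return sorted(keys)
--
-- def fill_missing_keys(data: List[Dict[str, Any]]) -> List[Dict[str, Any]]:
--     """Fill missing keys with empty strings, converting None to empty string."""
--     if not data:
--         return data
--
--     all_keys = union_keys(data)
--     result = []
--
--     for item in data: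
--         filled = {}
--         for key in all_keys:
--             value = item.get(key)
--             if value is None:
--                 value = ""
--             filled[key] = value
--         result.append(filled)
--
--     return result
-- ===== SOURCE B (Python) =====
-- def fill_missing_keys(data):
--     """Fill missing keys with empty strings, converting None to empty string."""
--     if not data:
--         return data
--     all_keys = sorted({k for item in data for k in item})
--     rows = [([], item.get) for item in data]
--     for k in all_keys:
--         for row, get in rows:
--             v = get(k)
--             row.append("" if v is None else v)
--     return [dict(zip(all_keys, row)) for row, _ in rows]
-- ===== Notes on version B (the rewrite author's own statement) =====
-- stated objective: alternative
-- what changed: B is columnar/key-major where A is item-major: instead of building each output dict completely before the next, B walks the sorted key union once, appending that key's value for every item to a per-item row in parallel, and only at the end assembles each dict with dict(zip(all_keys, row)); output order coincides because zip pairs the same sorted keys with each row.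
import Mathlib
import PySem

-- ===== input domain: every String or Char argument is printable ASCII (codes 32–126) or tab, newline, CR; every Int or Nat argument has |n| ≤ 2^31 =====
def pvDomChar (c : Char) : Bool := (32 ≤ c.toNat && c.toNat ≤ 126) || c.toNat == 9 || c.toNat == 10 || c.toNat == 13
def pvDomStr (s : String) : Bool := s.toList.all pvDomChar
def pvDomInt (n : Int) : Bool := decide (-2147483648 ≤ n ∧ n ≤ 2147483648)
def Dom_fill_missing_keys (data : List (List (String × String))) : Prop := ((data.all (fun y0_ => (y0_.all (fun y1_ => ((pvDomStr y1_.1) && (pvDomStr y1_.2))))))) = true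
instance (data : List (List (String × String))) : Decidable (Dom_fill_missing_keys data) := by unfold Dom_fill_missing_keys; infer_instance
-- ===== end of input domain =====

-- B is columnar/key-major where A is item-major: B walks the sorted key union once, appending each
-- key's value for every item to per-item rows in parallel, and assembles the dicts only at the end.

-- ===== PORT A =====
-- union_keys: keys = set(); for item in data: keys.update(item.keys()); return sorted(keys)
def union_keys_port (data : List (List (String × String))) : List String :=
  let keys := data.foldl (fun keys item => PySem.Set.update keys (item.map (fun p => p.1))) PySem.Set.empty
  PySem.List.sorted keys (fun k => k) false

-- literal port of A; a dict argument/result is its association list of items,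
-- item.get(key) is first-match lookup; values are typed String, so the Python
-- `None` value case is exactly the missing-key case of get?.
def fill_missing_keys (data : List (List (String × String))) : List (List (String × String)) :=
  if data = [] then data
  else
    let all_keys := union_keys_port data
    let result := data.foldl (fun result item =>
      let filled := all_keys.foldl (fun filled key =>
        let value := (PySem.Dict.mk item : PySem.Dict String String).get? key
        let value := match value with
          | none => ""
          | some v => v
        filled.insert key value) PySem.Dict.empty
      result ++ [filled.items]) []
    result

-- ===== PORT B =====
-- literal port of Source B: sorted set-comprehension of keys, rows = [([], item.get) for item in data],
-- then for each key k (outer) append k's value to every row; finally dict(zip(all_keys, row)) per row.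
def fill_missing_keys_alt (data : List (List (String × String))) : List (List (String × String)) :=
  if data = [] then data
  else
    let all_keys := PySem.List.sorted
      (PySem.Set.ofList (data.flatMap (fun item => item.map (fun p => p.1)))) (fun k => k) false
    let rows : List (List String × List (String × String)) := data.map (fun item => ([], item))
    let rows := all_keys.foldl (fun rows k =>
      rows.map (fun rg =>
        let v := (PySem.Dict.mk rg.2 : PySem.Dict String String).get? k
        (rg.1 ++ [match v with | none => "" | some v => v], rg.2))) rows
    rows.map (fun rg => (PySem.Dict.ofList (all_keys.zip rg.1) : PySem.Dict String String).items)

-- ===== PRECONDITION & SPEC =====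
def Spec_fill_missing_keys (data : List (List (String × String))) (out : List (List (String × String))) : Prop := out = fill_missing_keys_alt data
instance (data : List (List (String × String))) (out : List (List (String × String))) : Decidable (Spec_fill_missing_keys data out) := by unfold Spec_fill_missing_keys; infer_instance

-- ===== CLAIM (what is proved, stated in full; the proofs are below) =====
def Claim_equal_fill_missing_keys : Prop := ∀ (data : List (List (String × String))), Dom_fill_missing_keys data → Spec_fill_missing_keys data (fill_missing_keys data)

-- ===== LEMMAS AND PROOFS =====

-- the value both ports emit for key k of item
def pvVal (item : List (String × String)) (k : String) : String :=
  match (PySem.Dict.mk item : PySem.Dict String String).get? k with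
  | none => ""
  | some v => v

-- zipping a list with its own image under f pairs each element with its image
theorem zip_map_self {A B : Type} (f : A → B) :
    ∀ l : List A, l.zip (l.map f) = l.map (fun a => (a, f a))
  | [] => rfl
  | a :: l => by simp [zip_map_self f l]

-- the two ports compute the same sorted key union
theorem union_keys_eq (data : List (List (String × String))) :
    union_keys_port data
      = PySem.List.sorted
          (PySem.Set.ofList (data.flatMap (fun item => item.map (fun p => p.1)))) (fun k => k) false := by
  unfold union_keys_port
  simp only [PySem.Set.ofList, PySem.Set.update, List.foldl_flatMap]

theorem nodup_union_keys (data : List (List (String × String))) :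
    (union_keys_port data).Nodup := by
  rw [union_keys_eq]
  exact (PySem.List.sorted_perm _ _ _).nodup_iff.mpr (PySem.Set.nodup_ofList _)

-- B's key-major fold over any key list ks appends, to every per-item row of the
-- column state, the values pvVal item k for each k of ks in order
theorem rowfold (data : List (List (String × String))) :
    ∀ (ks : List String) (f : List (String × String) → List String),
      (ks.foldl (fun rows k =>
          rows.map (fun rg =>
            (rg.1 ++ [pvVal rg.2 k], rg.2)))
        (data.map (fun item => (f item, item))))
      = data.map (fun item => (f item ++ ks.map (fun k => pvVal item k), item)) := by
  intro ks
  induction ks with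
  | nil => intro f; simp
  | cons k ks ih =>
    intro f
    have hstep : (data.map (fun item => (f item, item))).map
          (fun rg => (rg.1 ++ [pvVal rg.2 k], rg.2))
        = data.map (fun item => ((fun item => f item ++ [pvVal item k]) item, item)) := by
      rw [List.map_map]; rfl
    simp only [List.foldl_cons, hstep, ih (fun item => f item ++ [pvVal item k]),
      List.map_cons, List.append_assoc, List.singleton_append]

-- A's per-item fill over the key union builds exactly the (k, pvVal item k) list
theorem item_fill_eq (data : List (List (String × String))) (item : List (String × String)) :
    ((union_keys_port data).foldl (fun filled key =>
        filled.insert key (pvVal item key)) PySem.Dict.empty).items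
      = (union_keys_port data).map (fun k => (k, pvVal item k)) := by
  have h := PySem.Dict.items_foldl_insert_fresh (l := union_keys_port data)
      (k := fun x => x) (v := fun x => pvVal item x) (d := PySem.Dict.empty)
      (by intro a _; simp [PySem.Dict.contains, PySem.Dict.empty])
      (by simpa using nodup_union_keys data)
  simpa [PySem.Dict.empty] using h

-- dict(zip(all_keys, row)) over the Nodup key union, with row the pvVal column, is the assoc list itself
theorem ofList_zip_items (data : List (List (String × String))) (item : List (String × String)) :
    (PySem.Dict.ofList ((union_keys_port data).zip
        ((union_keys_port data).map (fun k => pvVal item k))) : PySem.Dict String String).items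
      = (union_keys_port data).map (fun k => (k, pvVal item k)) := by
  rw [zip_map_self]
  have h := PySem.Dict.items_foldl_insert_fresh
      (l := (union_keys_port data).map (fun k => (k, pvVal item k)))
      (k := Prod.fst) (v := Prod.snd) (d := PySem.Dict.empty)
      (by intro a _; simp [PySem.Dict.contains, PySem.Dict.empty])
      (by
        rw [List.map_map]
        have : (Prod.fst ∘ fun k => (k, pvVal item k)) = id := rfl
        rw [this, List.map_id]
        exact nodup_union_keys data)
  have hofl : (PySem.Dict.ofList ((union_keys_port data).map (fun k => (k, pvVal item k)))
      : PySem.Dict String String)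
      = ((union_keys_port data).map (fun k => (k, pvVal item k))).foldl
          (fun d a => d.insert a.1 a.2) PySem.Dict.empty := rfl
  rw [hofl]
  simpa [PySem.Dict.empty] using h

-- ===== VERDICT (by name: the statement is the Claim_ definition above) =====
theorem fill_missing_keys_spec : Claim_equal_fill_missing_keys := by
  intro data _
  unfold Spec_fill_missing_keys fill_missing_keys fill_missing_keys_alt
  by_cases hd : data = []
  · simp [hd]
  · simp only [hd, if_false]
    rw [PySem.List.foldl_append_singleton_eq_map, List.nil_append, ← union_keys_eq]
    have hpv : ∀ (item : List (String × String)) (key : String),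
        (match (PySem.Dict.mk item : PySem.Dict String String).get? key with
          | none => "" | some v => v) = pvVal item key := fun _ _ => rfl
    simp only [hpv]
    have hB := rowfold data (union_keys_port data) (fun _ => [])
    simp only [List.nil_append] at hB
    rw [hB, List.map_map]
    apply List.map_congr_left
    intro item _
    rw [item_fill_eq data item]
    exact (ofList_zip_items data item).symm
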